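-- pv_equiv track=rewrite | github.com/shotgunsoftware/tk-core | python/tank/descriptor/io_descriptor/perforce_change.py | _find_latest_change
-- ===== SOURCE A (Python) =====
-- def _find_latest_change(changelist):
--     """
--     Given a list of changelist strings, cast to ints and get the max value
--     to determine the latest changelist.
--
--     :return: latest changelist or None
--     """
--
--     changes = []
--     for i in changelist:
--         try:
--             changes.append(int(i))
--         except ValueError:
--             pass
--
--     return max(changes) if changes else None
-- ===== SOURCE B (Python) =====
-- def _find_latest_change(changelist):
--     """Single-pass running maximum over the parseable ints; no intermediate list."""
--     latest = None
--     for i in changelist: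
--         try:
--             v = int(i)
--         except ValueError:
--             continue
--         if latest is None or v > latest:
--             latest = v
--     return latest
-- ===== Notes on version B (the rewrite author's own statement) =====
-- stated objective: simpler
-- what changed: Replaces collect-into-a-list-then-max() with a single-pass running maximum carried in one Optional accumulator; no intermediate list and no separate max() call.
import Mathlib
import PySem

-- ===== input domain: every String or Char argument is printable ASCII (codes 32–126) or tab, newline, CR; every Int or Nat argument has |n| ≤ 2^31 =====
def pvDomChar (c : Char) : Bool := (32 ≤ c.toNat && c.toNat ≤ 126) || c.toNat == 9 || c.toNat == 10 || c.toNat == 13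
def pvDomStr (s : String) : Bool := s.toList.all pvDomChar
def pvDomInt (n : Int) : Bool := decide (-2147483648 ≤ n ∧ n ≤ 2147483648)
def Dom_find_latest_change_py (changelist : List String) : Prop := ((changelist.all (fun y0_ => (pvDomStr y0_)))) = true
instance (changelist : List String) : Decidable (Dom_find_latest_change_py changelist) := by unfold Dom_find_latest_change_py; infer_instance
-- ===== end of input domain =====

-- B replaces A's collect-into-a-list-then-max() with a single-pass running maximum (simpler: one Optional accumulator, no intermediate list).
-- ===== PORT A =====
-- A: build the list `changes` of successfully parsed ints, then `max(changes) if changes else None`.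
def find_latest_change_py (changelist : List String) : Option Int :=
  let changes := changelist.foldl (fun changes i =>
    match PySem.Int.ofStr? i with
    | some v => changes ++ [v]
    | none => changes) []
  if changes = [] then none else PySem.List.max? changes (fun x => x)

-- ===== PORT B =====
-- B: one pass, running maximum in `latest : Option Int`.
def find_latest_change_py_alt (changelist : List String) : Option Int :=
  changelist.foldl (fun latest i =>
    match PySem.Int.ofStr? i with
    | none => latest
    | some v =>
      match latest with
      | none => some v
      | some m => if v > m then some v else latest) none

-- ===== PRECONDITION & SPEC =====
def Spec_find_latest_change_py (changelist : List String) (out : Option Int) : Prop := out = find_latest_change_py_alt changelist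
instance (changelist : List String) (out : Option Int) : Decidable (Spec_find_latest_change_py changelist out) := by unfold Spec_find_latest_change_py; infer_instance

-- ===== CLAIM (what is proved, stated in full; the proofs are below) =====
def Claim_equal_find_latest_change_py : Prop := ∀ (changelist : List String), Dom_find_latest_change_py changelist → Spec_find_latest_change_py changelist (find_latest_change_py changelist)

-- ===== LEMMAS AND PROOFS =====
theorem max?_snoc (acc : List Int) (v : Int) :
    PySem.List.max? (acc ++ [v]) (fun x => x) =
      some (match PySem.List.max? acc (fun x => x) with | none => v | some m => max m v) := by
  cases acc with
  | nil =>
    have h0 : PySem.List.max? ([] : List Int) (fun x => x) = none := by decide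
    simp [PySem.List.max?_id_cons, h0]
  | cons x t =>
    simp [PySem.List.max?_id_cons, List.foldl_append]

-- Invariant: the running maximum carried by B's loop equals max? of A's collected list.
theorem loop_eq (xs : List String) (acc : List Int) :
    PySem.List.max? (xs.foldl (fun changes i =>
      match PySem.Int.ofStr? i with
      | some v => changes ++ [v]
      | none => changes) acc) (fun x => x) =
    xs.foldl (fun latest i =>
      match PySem.Int.ofStr? i with
      | none => latest
      | some v =>
        match latest with
        | none => some v
        | some m => if v > m then some v else latest) (PySem.List.max? acc (fun x => x)) := by
  induction xs generalizing acc with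
  | nil => rfl
  | cons i t ih =>
    simp only [List.foldl_cons]
    cases h : PySem.Int.ofStr? i with
    | none => exact ih acc
    | some v =>
      rw [ih (acc ++ [v]), max?_snoc]
      cases hm : PySem.List.max? acc (fun x => x) with
      | none => rfl
      | some m =>
        congr 1
        rcases lt_or_ge m v with hlt | hle
        · simp [hlt, max_eq_right (le_of_lt hlt)]
        · simp [not_lt.mpr hle, max_eq_left hle]

-- ===== VERDICT (by name: the statement is the Claim_ definition above) =====
theorem find_latest_change_py_spec : Claim_equal_find_latest_change_py := by
  intro changelist _
  unfold Spec_find_latest_change_py find_latest_change_py find_latest_change_py_alt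
  have h0 : PySem.List.max? ([] : List Int) (fun x => x) = none := by decide
  rw [← h0, ← loop_eq]
  by_cases hc : (changelist.foldl (fun changes i =>
      match PySem.Int.ofStr? i with
      | some v => changes ++ [v]
      | none => changes) []) = ([] : List Int)
  · simp [hc, h0]
  · simp [hc]
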